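-- pv_equiv track=rewrite | github.com/liiiiiene/RecommendSystem | model/System/recommend_dict.py | split_user_seqs
-- ===== SOURCE A (Python) =====
-- def split_user_seqs(user_seqs,n):
--
--     slice_step = max(1,len(user_seqs)//n)
--     total_list = list(user_seqs.items())
--     result = [dict() for _ in range(n)]
--
--     counter = 0
--     for i in range(0,len(total_list),slice_step):
--         item_dict = dict(total_list[i:min(i+slice_step,len(total_list))])
--         result[counter%n].update(item_dict)
--         counter += 1
--     return result
-- ===== SOURCE B (Python) =====
-- def split_user_seqs(user_seqs, n):
--     # Single pass: each item's bucket is computed in closed form instead of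
--     # building intermediate chunk dicts and merging them with update().
--     slice_step = max(1, len(user_seqs) // n)
--     result = [dict() for _ in range(n)]
--     for idx, (key, val) in enumerate(user_seqs.items()):
--         result[(idx // slice_step) % n][key] = val
--     return result
-- ===== Notes on version B (the rewrite author's own statement) =====
-- stated objective: simpler
-- what changed: Instead of slicing the item list into chunk dicts and merging each chunk into its bucket with update(), B makes one pass over enumerate(items) and places every pair directly at result[(idx // slice_step) % n], with no intermediate dicts or slices.
import Mathlib
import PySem

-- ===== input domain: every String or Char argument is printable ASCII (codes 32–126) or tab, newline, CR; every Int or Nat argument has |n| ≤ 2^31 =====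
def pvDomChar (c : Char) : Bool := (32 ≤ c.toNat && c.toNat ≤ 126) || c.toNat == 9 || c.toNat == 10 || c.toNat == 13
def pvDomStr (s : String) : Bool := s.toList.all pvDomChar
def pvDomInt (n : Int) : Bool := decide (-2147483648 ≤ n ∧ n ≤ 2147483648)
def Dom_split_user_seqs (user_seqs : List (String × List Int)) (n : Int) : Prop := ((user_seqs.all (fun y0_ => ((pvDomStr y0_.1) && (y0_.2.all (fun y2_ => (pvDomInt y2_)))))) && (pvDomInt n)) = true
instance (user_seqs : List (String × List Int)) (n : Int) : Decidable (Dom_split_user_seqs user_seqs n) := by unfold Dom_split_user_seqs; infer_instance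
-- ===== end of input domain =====

-- B replaces A's chunk-slicing + per-chunk dict merge by one pass that assigns each
-- item directly to bucket (idx // slice_step) % n (objective: simpler; same cost).

-- ===== PORT A =====
def split_user_seqs (user_seqs : List (String × List Int)) (n : Int) : List (List (String × List Int)) :=
  let slice_step : Int := max 1 (PySem.Int.floordiv (user_seqs.length : Int) n)
  let total_list : List (String × List Int) := user_seqs
  let result : List (PySem.Dict String (List Int)) :=
    (PySem.List.pyRange 0 n 1).map (fun _ => PySem.Dict.empty)
  let final :=
    (PySem.List.pyRange 0 (total_list.length : Int) slice_step).foldl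
      (fun (st : List (PySem.Dict String (List Int)) × Int) i =>
        let item_dict := PySem.Dict.ofList
          (PySem.List.slice total_list (some i) (some (min (i + slice_step) (total_list.length : Int))))
        -- result[counter % n].update(item_dict): for n > 0 (Pre_) counter % n is in range,
        -- so List.modify is exactly the in-place element update
        (st.1.modify (PySem.Int.mod st.2 n).toNat (fun b => b.update item_dict.items), st.2 + 1))
      (result, 0)
  final.1.map (fun d => d.items)

-- ===== PORT B =====
def split_user_seqs_alt (user_seqs : List (String × List Int)) (n : Int) : List (List (String × List Int)) :=
  let slice_step : Int := max 1 (PySem.Int.floordiv (user_seqs.length : Int) n)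
  let result : List (PySem.Dict String (List Int)) :=
    (PySem.List.pyRange 0 n 1).map (fun _ => PySem.Dict.empty)
  ((PySem.List.enumerate user_seqs 0).foldl
      (fun res p =>
        res.modify (PySem.Int.mod (PySem.Int.floordiv p.1 slice_step) n).toNat
          (fun b => b.insert p.2.1 p.2.2))
      result).map (fun d => d.items)

-- ===== PRECONDITION & SPEC =====
-- Pre_ excludes only inputs where Python A raises: n = 0 (ZeroDivisionError) and
-- n < 0 with a non-empty dict (result is [] and result[0] raises IndexError).
def Pre_split_user_seqs (user_seqs : List (String × List Int)) (n : Int) : Prop :=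
  0 < n ∨ (n < 0 ∧ user_seqs = [])
instance (user_seqs : List (String × List Int)) (n : Int) : Decidable (Pre_split_user_seqs user_seqs n) := by unfold Pre_split_user_seqs; infer_instance
def pvWitness_split_user_seqs : (List (String × List Int)) × Int := ([("a", [1, 2]), ("b", [3])], 2)

def Spec_split_user_seqs (user_seqs : List (String × List Int)) (n : Int) (out : List (List (String × List Int))) : Prop := out = split_user_seqs_alt user_seqs n
instance (user_seqs : List (String × List Int)) (n : Int) (out : List (List (String × List Int))) : Decidable (Spec_split_user_seqs user_seqs n out) := by unfold Spec_split_user_seqs; infer_instance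

-- ===== CLAIM (what is proved, stated in full; the proofs are below) =====
def Claim_equal_split_user_seqs : Prop := ∀ (user_seqs : List (String × List Int)) (n : Int), Dom_split_user_seqs user_seqs n → Pre_split_user_seqs user_seqs n → Spec_split_user_seqs user_seqs n (split_user_seqs user_seqs n)

-- ===== LEMMAS AND PROOFS =====
theorem pv_commute (d : PySem.Dict String (List Int)) (k : String) (v : List Int)
    (q : String × List Int) (hk : d.contains k = true) (hq : q.1 ≠ k) :
    (d.insert q.1 q.2).insert k v = (d.insert k v).insert q.1 q.2 := by
  have hk1 : (d.insert q.1 q.2).contains k = true := by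
    rw [PySem.Dict.contains_insert]; simp [hk]
  have hq1 : (d.insert k v).contains q.1 = d.contains q.1 := by
    rw [PySem.Dict.contains_insert]; simp [hq]
  apply PySem.Dict.ext
  by_cases hc : d.contains q.1 = true
  · rw [PySem.Dict.items_insert_of_contains _ _ hk1,
        PySem.Dict.items_insert_of_contains _ _ hc,
        PySem.Dict.items_insert_of_contains _ _ (by rw [hq1]; exact hc),
        PySem.Dict.items_insert_of_contains _ _ hk]
    rw [List.map_map, List.map_map]
    apply List.map_congr_left
    intro p _
    simp only [Function.comp]
    by_cases h1 : p.1 = q.1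
    · have hpk : p.1 ≠ k := h1 ▸ hq
      simp [hq, h1]
    · by_cases h2 : p.1 = k <;> simp [h1, h2, Ne.symm hq]
  · have hc' : (d.insert k v).contains q.1 = false := by rw [hq1]; simpa using hc
    rw [PySem.Dict.items_insert_of_contains _ _ hk1,
        PySem.Dict.items_insert_of_not_contains _ _ (by simpa using hc),
        PySem.Dict.items_insert_of_not_contains _ _ hc',
        PySem.Dict.items_insert_of_contains _ _ hk]
    rw [List.map_append]
    simp [hq]

def pvIns (b : PySem.Dict String (List Int)) (l : List (String × List Int)) : PySem.Dict String (List Int) :=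
  l.foldl (fun b p => b.insert p.1 p.2) b

theorem pv_late_insert (m : List (String × List Int)) (d : PySem.Dict String (List Int))
    (k : String) (v : List Int) (hk : d.contains k = true) (hm : k ∉ m.map Prod.fst) :
    (pvIns d m).insert k v = pvIns (d.insert k v) m := by
  induction m generalizing d with
  | nil => rfl
  | cons q t ih =>
      simp only [List.map_cons, List.mem_cons] at hm
      push_neg at hm
      show ((pvIns (d.insert q.1 q.2) t).insert k v) = pvIns ((d.insert k v).insert q.1 q.2) t
      rw [ih (d.insert q.1 q.2) (by rw [PySem.Dict.contains_insert]; simp [hk]) hm.2,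
          pv_commute d k v q hk (fun h => hm.1 h.symm)]

theorem pv_ins_overwrite (m : List (String × List Int)) (d : PySem.Dict String (List Int))
    (k : String) (v : List Int) (hnd : (m.map Prod.fst).Nodup) (hk : k ∈ m.map Prod.fst) :
    pvIns d (m.map (fun p => if p.1 == k then (k, v) else p)) = (pvIns d m).insert k v := by
  induction m generalizing d with
  | nil => simp at hk
  | cons q t ih =>
      simp only [List.map_cons, List.nodup_cons] at hnd
      by_cases h1 : q.1 = k
      · have hkt : k ∉ t.map Prod.fst := h1 ▸ hnd.1
        have hmap : t.map (fun p => if p.1 == k then (k, v) else p) = t := by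
          conv_rhs => rw [show t = t.map id from (List.map_id t).symm]
          apply List.map_congr_left
          intro p hp
          have hne : p.1 ≠ k := by
            intro hc; exact hkt (hc ▸ List.mem_map_of_mem hp)
          simp [hne]
        show pvIns d (((if q.1 == k then (k, v) else q)) :: _) = _
        rw [List.map_cons] at *
        simp only [h1, beq_self_eq_true, if_pos]
        show pvIns (d.insert k v) (t.map _) = (pvIns (d.insert q.1 q.2) t).insert k v
        rw [hmap, pv_late_insert t (d.insert q.1 q.2) k v
              (by rw [PySem.Dict.contains_insert]; simp [h1]) hkt]
        rw [h1, PySem.Dict.insert_insert_self]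
      · have hkt : k ∈ t.map Prod.fst := by
          rcases List.mem_map.mp hk with ⟨p, hp, hpe⟩
          rcases List.mem_cons.mp hp with h | h
          · exact absurd (hpe ▸ congrArg Prod.fst h).symm h1
          · exact hpe ▸ List.mem_map_of_mem h
        have hb : (q.1 == k) = false := by simpa using h1
        show pvIns d ((if q.1 == k then (k, v) else q) :: _) = _
        rw [hb]
        show pvIns (d.insert q.1 q.2) (t.map _) = (pvIns (d.insert q.1 q.2) t).insert k v
        exact ih (d.insert q.1 q.2) hnd.2 hkt

theorem pv_ins_append (d : PySem.Dict String (List Int)) (l : List (String × List Int))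
    (p : String × List Int) : pvIns d (l ++ [p]) = (pvIns d l).insert p.1 p.2 := by
  simp [pvIns, List.foldl_append]

theorem pv_ins_insert_items (e d : PySem.Dict String (List Int))
    (k : String) (v : List Int) (hnd : e.keys.Nodup) :
    pvIns d ((e.insert k v).items) = (pvIns d e.items).insert k v := by
  have hnd' : (e.items.map Prod.fst).Nodup := by
    simpa [PySem.Dict.keys] using hnd
  by_cases hc : e.contains k = true
  · rw [PySem.Dict.items_insert_of_contains _ _ hc]
    exact pv_ins_overwrite e.items d k v hnd'
      (by simpa [PySem.Dict.keys] using (PySem.Dict.contains_iff_mem_keys e k).mp hc)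
  · rw [PySem.Dict.items_insert_of_not_contains _ _ (by simpa using hc)]
    exact pv_ins_append d e.items (k, v)

theorem pv_ins_update_items (l : List (String × List Int)) (d e : PySem.Dict String (List Int))
    (hnd : e.keys.Nodup) :
    pvIns d (PySem.Dict.update e l).items = pvIns (pvIns d e.items) l := by
  induction l generalizing d e with
  | nil => rfl
  | cons p t ih =>
      show pvIns d (PySem.Dict.update (e.insert p.1 p.2) t).items = pvIns ((pvIns d e.items).insert p.1 p.2) t
      rw [ih _ _ (PySem.Dict.nodup_keys_insert _ _ _ hnd), pv_ins_insert_items e d p.1 p.2 hnd]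

theorem pv_ins_ofList_items (l : List (String × List Int)) (d : PySem.Dict String (List Int)) :
    pvIns d (PySem.Dict.ofList l).items = pvIns d l := by
  show pvIns d (PySem.Dict.update PySem.Dict.empty l).items = pvIns d l
  rw [pv_ins_update_items l d PySem.Dict.empty (by simp [PySem.Dict.empty, PySem.Dict.keys])]
  rfl

def pvStepB (S n : Int) (res : List (PySem.Dict String (List Int))) (p : Int × String × List Int) :
    List (PySem.Dict String (List Int)) :=
  res.modify (PySem.Int.mod (PySem.Int.floordiv p.1 S) n).toNat (fun b => b.insert p.2.1 p.2.2)

theorem pv_foldl_modify_const {α β : Type} (xs : List β) (j : Nat)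
    (g : α → β → α) (res : List α) :
    xs.foldl (fun r x => r.modify j (fun b => g b x)) res
      = res.modify j (fun b => xs.foldl g b) := by
  induction xs generalizing res with
  | nil => show res = res.modify j fun b => b
           rw [show (fun b => b) = @id α from rfl, List.modify_id]
  | cons x t ih =>
      show t.foldl _ (res.modify j fun b => g b x) = _
      rw [ih, List.modify_modify_eq]
      rfl

theorem pv_foldl_enumerate_snd {α β : Type} (l : List α) (i : Int) (f : β → α → β) (b : β) :
    (PySem.List.enumerate l i).foldl (fun acc p => f acc p.2) b = l.foldl f b := by
  induction l generalizing i b with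
  | nil => simp [PySem.List.enumerate]
  | cons x t ih => simp [PySem.List.enumerate_cons, ih]

theorem pv_bucket (s nn c j : Nat) (hj : j ≤ s) (hnn : 0 < nn) :
    (PySem.Int.mod (PySem.Int.floordiv ((c * (s + 1) + j : Nat) : Int) ((s + 1 : Nat) : Int)) ((nn : Nat) : Int)).toNat = c % nn := by
  rw [PySem.Int.floordiv_natCast, PySem.Int.mod_natCast]
  have h : (c * (s + 1) + j) / (s + 1) = c := by
    rw [Nat.mul_comm, Nat.mul_add_div (Nat.succ_pos s), Nat.div_eq_of_lt (by omega)]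
    omega
  rw [h]
  exact Int.toNat_natCast _

theorem pv_chunkB (s nn : Nat) (hnn : 0 < nn) (chunk : List (String × List Int)) (c : Nat)
    (hlen : chunk.length ≤ s + 1) (res : List (PySem.Dict String (List Int))) :
    (PySem.List.enumerate chunk ((c * (s + 1) : Nat) : Int)).foldl (pvStepB ((s + 1 : Nat) : Int) ((nn : Nat) : Int)) res
      = res.modify (c % nn) (fun b => pvIns b chunk) := by
  rw [PySem.List.foldl_congr_mem _ _
        (fun r (p : Int × String × List Int) => r.modify (c % nn) (fun b => b.insert p.2.1 p.2.2)) _ ?_]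
  · rw [pv_foldl_modify_const]
    congr 1
    funext b
    exact pv_foldl_enumerate_snd chunk _ (fun b (q : String × List Int) => b.insert q.1 q.2) b
  · intro acc p hp
    rcases (PySem.List.mem_enumerate_iff chunk _ p).mp hp with ⟨k, hk, rfl⟩
    show acc.modify (PySem.Int.mod (PySem.Int.floordiv _ _) _).toNat _ = _
    have h1 : ((c * (s + 1) : Nat) : Int) + (k : Int) = ((c * (s + 1) + k : Nat) : Int) := by push_cast; ring
    rw [h1, pv_bucket s nn c k (by omega) hnn]

def pvChunkFold (s nn : Nat) : List (String × List Int) → Nat → List (PySem.Dict String (List Int)) → List (PySem.Dict String (List Int))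
  | [], _, res => res
  | x :: t, c, res =>
      pvChunkFold s nn ((x :: t).drop (s + 1)) (c + 1)
        (res.modify (c % nn) (fun b => pvIns b ((x :: t).take (s + 1))))
  termination_by l => l.length
  decreasing_by simp

theorem pv_GB (s nn : Nat) (hnn : 0 < nn) (l : List (String × List Int)) (c : Nat)
    (res : List (PySem.Dict String (List Int))) :
    (PySem.List.enumerate l ((c * (s + 1) : Nat) : Int)).foldl (pvStepB ((s + 1 : Nat) : Int) ((nn : Nat) : Int)) res
      = pvChunkFold s nn l c res := by
  fun_induction pvChunkFold s nn l c res with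
  | case1 c res => simp [PySem.List.enumerate]
  | case2 x t c res ih =>
      have hsplit : x :: t = (x :: t).take (s + 1) ++ (x :: t).drop (s + 1) :=
        (List.take_append_drop _ _).symm
      conv_lhs => rw [hsplit]
      rw [PySem.List.enumerate_append, List.foldl_append,
          pv_chunkB s nn hnn _ c (by rw [List.length_take]; omega) res]
      by_cases hle : s + 1 ≤ (x :: t).length
      · have hlen : ((x :: t).take (s + 1)).length = s + 1 := by
          simp only [List.length_take, List.length_cons] at hle ⊢
          omega
        have hcast : ((c * (s + 1) : Nat) : Int) + (((x :: t).take (s + 1)).length : Int)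
            = (((c + 1) * (s + 1) : Nat) : Int) := by
          rw [hlen]; push_cast; ring
        rw [hcast]
        exact ih
      · have hnil : (x :: t).drop (s + 1) = [] := by
          apply List.drop_eq_nil_of_le
          simp only [List.length_cons] at hle ⊢
          omega
        rw [hnil]
        simp [PySem.List.enumerate, pvChunkFold]

theorem pv_pyRange_nil (a b st : Int) (hst : 0 < st) (hab : b ≤ a) :
    PySem.List.pyRange a b st = [] := by
  rw [PySem.List.pyRange_of_pos _ _ hst]
  simp [show ¬ a < b by omega]

theorem pv_pyRange_cons (a b st : Int) (hst : 0 < st) (hab : a < b) :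
    PySem.List.pyRange a b st = a :: PySem.List.pyRange (a + st) b st := by
  rw [PySem.List.pyRange_of_pos _ _ hst, PySem.List.pyRange_of_pos _ _ hst]
  have h1 : b - a + st - 1 = (b - a - 1) + 1 * st := by ring
  have h2 : (b - a + st - 1) / st = (b - a - 1) / st + 1 := by
    rw [h1, Int.add_mul_ediv_right _ _ (by omega : st ≠ 0)]
  have h3 : 0 ≤ (b - a - 1) / st := Int.ediv_nonneg (by omega) (by omega)
  have h4 : ((b - a + st - 1) / st).toNat = ((b - a - 1) / st).toNat + 1 := by
    rw [h2]; omega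
  rw [if_pos hab, h4, List.range_succ_eq_map, List.map_cons]
  congr 1
  · simp
  · rw [List.map_map]
    by_cases hab2 : a + st < b
    · have h5 : b - (a + st) + st - 1 = b - a - 1 := by ring
      rw [if_pos hab2, h5]
      apply List.map_congr_left
      intro k _
      simp [Function.comp]
      push_cast
      ring
    · have h6 : (b - a - 1) / st = 0 := by
        apply Int.ediv_eq_zero_of_lt (by omega) (by omega)
      rw [if_neg hab2, h6]
      simp

def pvStepA (total : List (String × List Int)) (S n : Int)
    (st : List (PySem.Dict String (List Int)) × Int) (i : Int) :
    List (PySem.Dict String (List Int)) × Int :=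
  (st.1.modify (PySem.Int.mod st.2 n).toNat
      (fun b => b.update (PySem.Dict.ofList
        (PySem.List.slice total (some i) (some (min (i + S) (total.length : Int))))).items),
    st.2 + 1)

theorem pv_slice_chunk (total : List (String × List Int)) (s a : Nat) :
    PySem.List.slice total (some ((a : Nat) : Int))
        (some (min (((a : Nat) : Int) + ((s + 1 : Nat) : Int)) (total.length : Int)))
      = (total.drop a).take (s + 1) := by
  have h0 : (0 : Int) ≤ min (((a : Nat) : Int) + ((s + 1 : Nat) : Int)) (total.length : Int) := by
    omega
  rw [PySem.List.slice_toNat total (by omega) h0]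
  simp only [Int.toNat_natCast]
  rw [List.take_eq_take_iff]
  simp only [List.length_drop]
  omega

theorem pv_GA (s nn : Nat) (hnn : 0 < nn) (total : List (String × List Int)) (c : Nat)
    (res : List (PySem.Dict String (List Int))) :
    ((PySem.List.pyRange ((c * (s + 1) : Nat) : Int) (total.length : Int) ((s + 1 : Nat) : Int)).foldl
        (pvStepA total ((s + 1 : Nat) : Int) ((nn : Nat) : Int)) (res, ((c : Nat) : Int))).1
      = pvChunkFold s nn (total.drop (c * (s + 1))) c res := by
  have key : ∀ (m c : Nat) (res : List (PySem.Dict String (List Int))),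
      total.length - c * (s + 1) ≤ m →
      ((PySem.List.pyRange ((c * (s + 1) : Nat) : Int) (total.length : Int) ((s + 1 : Nat) : Int)).foldl
          (pvStepA total ((s + 1 : Nat) : Int) ((nn : Nat) : Int)) (res, ((c : Nat) : Int))).1
        = pvChunkFold s nn (total.drop (c * (s + 1))) c res := by
    intro m
    induction m with
    | zero =>
        intro c res hm
        have hge : total.length ≤ c * (s + 1) := by omega
        rw [pv_pyRange_nil _ _ _ (by omega) (by exact_mod_cast Nat.cast_le.mpr hge),
            List.drop_eq_nil_of_le hge]
        simp [pvChunkFold]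
    | succ m ih =>
        intro c res hm
        by_cases hlt : c * (s + 1) < total.length
        · -- unfold one chunk
          rw [pv_pyRange_cons _ _ _ (by omega) (by exact_mod_cast Nat.cast_lt.mpr hlt)]
          rw [List.foldl_cons]
          -- reduce the step
          have hstep : pvStepA total ((s + 1 : Nat) : Int) ((nn : Nat) : Int)
              (res, ((c : Nat) : Int)) ((c * (s + 1) : Nat) : Int)
              = (res.modify (c % nn) (fun b => pvIns b ((total.drop (c * (s + 1))).take (s + 1))),
                 (((c + 1 : Nat) : Nat) : Int)) := by
            unfold pvStepA
            refine Prod.ext ?_ ?_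
            · show res.modify _ _ = _
              rw [PySem.Int.mod_natCast, Int.toNat_natCast]
              congr 1
              funext b
              rw [pv_slice_chunk total s (c * (s + 1))]
              exact pv_ins_ofList_items _ b
            · show ((c : Nat) : Int) + 1 = _
              push_cast; ring
          rw [hstep]
          have hstart : ((c * (s + 1) : Nat) : Int) + ((s + 1 : Nat) : Int)
              = (((c + 1) * (s + 1) : Nat) : Int) := by push_cast; ring
          rw [hstart, ih (c + 1) _ (by omega)]
          -- now identify the RHS chunk recursion step
          obtain ⟨x, t, hxt⟩ : ∃ x t, total.drop (c * (s + 1)) = x :: t := by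
            cases h : total.drop (c * (s + 1)) with
            | nil =>
                exfalso
                have := List.length_drop (l := total) (i := c * (s + 1))
                rw [h] at this
                simp at this
                omega
            | cons x t => exact ⟨x, t, rfl⟩
          conv_rhs => rw [hxt]
          rw [pvChunkFold]
          have hdrop : (x :: t).drop (s + 1) = total.drop ((c + 1) * (s + 1)) := by
            rw [← hxt, List.drop_drop]
            congr 1
            ring
          have htake : (x :: t).take (s + 1) = (total.drop (c * (s + 1))).take (s + 1) := by
            rw [hxt]
          rw [hdrop, htake]
        · have hge : total.length ≤ c * (s + 1) := by omega
          rw [pv_pyRange_nil _ _ _ (by omega) (by exact_mod_cast Nat.cast_le.mpr hge),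
              List.drop_eq_nil_of_le hge]
          simp [pvChunkFold]
  exact key (total.length - c * (s + 1)) c res (le_refl _)

theorem pv_pyRange_self (a st : Int) : PySem.List.pyRange a a st = [] := by
  simp [PySem.List.pyRange]

theorem pv_main : ∀ (user_seqs : List (String × List Int)) (n : Int),
    (0 < n ∨ (n < 0 ∧ user_seqs = [])) →
    split_user_seqs user_seqs n = split_user_seqs_alt user_seqs n := by
  intro u n hpre
  rcases hpre with hn | ⟨hn, rfl⟩
  · obtain ⟨nn, hnn0, hnneq⟩ : ∃ nn : Nat, 0 < nn ∧ n = ((nn : Nat) : Int) :=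
      ⟨n.toNat, by omega, by omega⟩
    subst hnneq
    have hS1 : 1 ≤ max 1 (PySem.Int.floordiv (u.length : Int) ((nn : Nat) : Int)) := le_max_left _ _
    obtain ⟨s, hs⟩ : ∃ s : Nat,
        max 1 (PySem.Int.floordiv (u.length : Int) ((nn : Nat) : Int)) = ((s + 1 : Nat) : Int) :=
      ⟨(max 1 (PySem.Int.floordiv (u.length : Int) ((nn : Nat) : Int)) - 1).toNat, by omega⟩
    have hA : split_user_seqs u ((nn : Nat) : Int)
        = (pvChunkFold s nn u 0 ((PySem.List.pyRange 0 ((nn : Nat) : Int) 1).map (fun _ => PySem.Dict.empty))).map (fun d => d.items) := by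
      simp only [split_user_seqs]
      rw [hs]
      have h := pv_GA s nn hnn0 u 0 ((PySem.List.pyRange 0 ((nn : Nat) : Int) 1).map (fun _ => PySem.Dict.empty))
      simp only [Nat.zero_mul, Nat.cast_zero, List.drop_zero] at h
      rw [← h]
      rfl
    have hB : split_user_seqs_alt u ((nn : Nat) : Int)
        = (pvChunkFold s nn u 0 ((PySem.List.pyRange 0 ((nn : Nat) : Int) 1).map (fun _ => PySem.Dict.empty))).map (fun d => d.items) := by
      simp only [split_user_seqs_alt]
      rw [hs]
      have h := pv_GB s nn hnn0 u 0 ((PySem.List.pyRange 0 ((nn : Nat) : Int) 1).map (fun _ => PySem.Dict.empty))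
      simp only [Nat.zero_mul, Nat.cast_zero] at h
      rw [← h]
      rfl
    rw [hA, hB]
  · simp [split_user_seqs, split_user_seqs_alt, pv_pyRange_self,
      PySem.List.pyRange_one_eq_nil (by omega : (n:Int) ≤ 0), PySem.List.enumerate]

-- ===== VERDICT (by name: the statement is the Claim_ definition above) =====
theorem split_user_seqs_spec : Claim_equal_split_user_seqs := by
  intro u n _ hpre
  unfold Spec_split_user_seqs
  exact pv_main u n hpre
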